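-- pv_equiv track=rewrite | github.com/tal-sitton/Super-Smash-Team-Server | playerV2.py | get_wanted_height
-- ===== SOURCE A (Python) =====
-- class Constants:
--     JUMP = "Jump"
--     FALL = "Fall"
--     IDLE = "Idle"
--     BEEN_HIT = "Hurt"
--     A_PUNCH = "A_PUN"
--     A = "A_"
--     A_AIR = "AAir"
--     MOVE_SPRITE = "Walk"
--     MOVE_RIGHT = "mr"
--     MOVE_LEFT = "ml"
--     MOVE_DOWN = "down"
--     RELEASED = "rel"
--     SCREEN_SIZE = [1280, 720]
--     DEATH_DISTANCE = 200
--     MOVING_DISTANCE = 11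
--     GROUND_UNMOVABLE = [A_PUNCH]
--     FULL_UNMOVABLE = [BEEN_HIT]
--     JUMP_PUNCH_RATE = 0.050  # in seconds
--     # FIRST_PLATFORM = ((190, 340), 120)
--     PLATFORM_SIZE = 190
--     PLATFORMS_POSITIONS = [((545, 545 + PLATFORM_SIZE), 60), ((165, 165 + PLATFORM_SIZE), 140),
--                            ((820, 820 + PLATFORM_SIZE), 140), ((54, 1090), 300)]
--     BOARDERS_Y = [-DEATH_DISTANCE, SCREEN_SIZE[1] + DEATH_DISTANCE]
--     BOARDERS_X = [-DEATH_DISTANCE, SCREEN_SIZE[0] + DEATH_DISTANCE]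
--
-- def get_wanted_height(need_below, position):
--     # closest = [Constants.PLATFORMS_POSITIONS[len(Constants.PLATFORMS_POSITIONS) - 1], 99999]
--     closest = [((-999, 999), Constants.BOARDERS_Y[1]), 99999]
--     for platform in Constants.PLATFORMS_POSITIONS:
--         if not need_below and position[1] <= platform[1] and \
--                 platform[0][0] <= position[0] <= platform[0][1] and closest[1] > platform[1] - position[1]:
--             closest = [platform, platform[1] - position[1]]
--         elif need_below and position[1] < platform[1] and platform[0][0] < position[0] < platform[0][1]:
--             closest = [platform, platform[1] - position[1]]
--     return closest[0][1]
-- ===== SOURCE B (Python) =====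
-- # The platform list is a fixed constant, so B does not scan it at all: the x-axis is
-- # partitioned once (on paper) into the regions the four platforms induce, and the answer
-- # is read off a branch table of threshold comparisons.
-- # Geometry used: the wide platform ((54,1090),300) strictly contains every other platform's
-- # x-interval and is the last (hence winning) match of the below-branch; for the above-branch
-- # each x-region has a fixed ascending pair of candidate heights.
-- def get_wanted_height(need_below, position):
--     x, y = position[0], position[1]
--     if need_below:
--         return 300 if 54 < x < 1090 and y < 300 else 920
--     if 545 <= x <= 735:
--         return 60 if y <= 60 else (300 if y <= 300 else 920)
--     if 165 <= x <= 355 or 820 <= x <= 1010: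
--         return 140 if y <= 140 else (300 if y <= 300 else 920)
--     if 54 <= x <= 1090:
--         return 300 if y <= 300 else 920
--     return 920
-- ===== Notes on version B (the rewrite author's own statement) =====
-- stated objective: simpler
-- what changed: Replaces A's accumulator scan of the platform list (threading a [platform, distance] pair with a 99999 sentinel cap) by a loopless branch table: the constant platforms' x-intervals are partitioned on paper into regions, and the answer is read off threshold comparisons on x and y with no list traversal at all.
-- intended difference: When need_below is false and position[1] is at most (nearest matching platform height - 99999), A's sentinel cap 99999 rejects every matching platform and A returns the 920 default, while B returns the nearest matching platform height, which is the intended value since the cap is only an initialisation sentinel. — e.g. on get_wanted_height(false, [600, -100000]): A returns 920, B returns 60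
import Mathlib
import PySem

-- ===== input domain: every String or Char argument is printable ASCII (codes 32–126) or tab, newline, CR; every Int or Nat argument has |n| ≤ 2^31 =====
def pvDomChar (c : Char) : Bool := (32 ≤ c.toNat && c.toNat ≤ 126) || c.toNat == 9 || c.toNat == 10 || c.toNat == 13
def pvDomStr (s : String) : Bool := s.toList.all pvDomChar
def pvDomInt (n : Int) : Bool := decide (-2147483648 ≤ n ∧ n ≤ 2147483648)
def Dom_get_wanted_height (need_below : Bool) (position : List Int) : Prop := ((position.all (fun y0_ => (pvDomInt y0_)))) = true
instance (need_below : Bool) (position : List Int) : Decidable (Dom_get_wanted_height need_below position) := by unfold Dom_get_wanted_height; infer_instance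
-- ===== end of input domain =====

-- B replaces A's accumulator scan of the platform list by a loopless branch table over the fixed
-- x-regions the constant platforms induce; simpler decomposition. A's 99999 sentinel cap makes it
-- return the 920 default for extremely low positions even when a platform matches; B returns the
-- matching height there (the D_ region below).


-- ===== PORT A =====
-- Constants.PLATFORMS_POSITIONS
def pvPlatformsA : List ((Int × Int) × Int) :=
  [((545, 735), 60), ((165, 355), 140), ((820, 1010), 140), ((54, 1090), 300)]

-- A's loop over the accumulator closest = (platform, distance), started at (((-999,999),920), 99999)
def pvLoopA (need_below : Bool) (x y : Int) : Int :=
  (pvPlatformsA.foldl (fun c platform =>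
      if need_below = false ∧ y ≤ platform.2 ∧ platform.1.1 ≤ x ∧ x ≤ platform.1.2 ∧
          c.2 > platform.2 - y then
        (platform, platform.2 - y)
      else if need_below = true ∧ y < platform.2 ∧ platform.1.1 < x ∧ x < platform.1.2 then
        (platform, platform.2 - y)
      else c)
    (((-999, 999), 920), 99999)).1.2

def get_wanted_height (need_below : Bool) (position : List Int) : Int :=
  match PySem.List.pyGet? position 0, PySem.List.pyGet? position 1 with
  | some x, some y => pvLoopA need_below x y
  | _, _ => 0  -- IndexError in Python; excluded by Pre_

-- ===== PORT B =====
-- loopless branch table over the x-regions the constant platform list induces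
def pvCoreB (need_below : Bool) (x y : Int) : Int :=
  if need_below then
    if 54 < x ∧ x < 1090 ∧ y < 300 then 300 else 920
  else if 545 ≤ x ∧ x ≤ 735 then
    if y ≤ 60 then 60 else if y ≤ 300 then 300 else 920
  else if (165 ≤ x ∧ x ≤ 355) ∨ (820 ≤ x ∧ x ≤ 1010) then
    if y ≤ 140 then 140 else if y ≤ 300 then 300 else 920
  else if 54 ≤ x ∧ x ≤ 1090 then
    if y ≤ 300 then 300 else 920
  else 920

def get_wanted_height_alt (need_below : Bool) (position : List Int) : Int :=
  match PySem.List.pyGet? position 0 with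
  | none => 0  -- IndexError in Python; excluded by Pre_
  | some x =>
    match PySem.List.pyGet? position 1 with
    | none => 0  -- IndexError in Python; excluded by Pre_
    | some y => pvCoreB need_below x y

-- ===== PRECONDITION & SPEC =====
-- A raises IndexError when position has fewer than 2 elements (position[1], position[0]); nothing else.
def Pre_get_wanted_height (need_below : Bool) (position : List Int) : Prop := 2 ≤ position.length
instance (need_below : Bool) (position : List Int) : Decidable (Pre_get_wanted_height need_below position) := by
  unfold Pre_get_wanted_height; infer_instance
def pvWitness_get_wanted_height : Bool × List Int := (false, [600, 0])

-- When need_below is false and position[1] ≤ (smallest matching platform height) - 99999, A's 99999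
-- sentinel cap rejects every matching platform and A returns the 920 default, while B returns the
-- smallest matching platform height — the intended value, the cap being only an initialisation sentinel.
def D_get_wanted_height (need_below : Bool) (position : List Int) : Prop :=
  let x := position.getD 0 0
  let y := position.getD 1 0
  need_below = false ∧ 2 ≤ position.length ∧ 54 ≤ x ∧ x ≤ 1090 ∧ y ≤ -99699 ∧
    (545 ≤ x ∧ x ≤ 735 → y ≤ -99939) ∧ (165 ≤ x ∧ x ≤ 355 ∨ 820 ≤ x ∧ x ≤ 1010 → y ≤ -99859)
instance (need_below : Bool) (position : List Int) : Decidable (D_get_wanted_height need_below position) := by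
  unfold D_get_wanted_height; infer_instance

def Spec_get_wanted_height (need_below : Bool) (position : List Int) (out : Int) : Prop :=
  ¬ D_get_wanted_height need_below position → out = get_wanted_height_alt need_below position
instance (need_below : Bool) (position : List Int) (out : Int) : Decidable (Spec_get_wanted_height need_below position out) := by
  unfold Spec_get_wanted_height; infer_instance

def pvDiffWitness_get_wanted_height : Bool × List Int := (false, [600, -100000])
def pvDiffWitnessOut_get_wanted_height : Int × Int := (920, 60)

-- ===== CLAIM (what is proved, stated in full; the proofs are below) =====
def Claim_unchanged_get_wanted_height : Prop := ∀ (need_below : Bool) (position : List Int), Dom_get_wanted_height need_below position → Pre_get_wanted_height need_below position → Spec_get_wanted_height need_below position (get_wanted_height need_below position)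
def Claim_changed_get_wanted_height : Prop := Dom_get_wanted_height (pvDiffWitness_get_wanted_height.1) (pvDiffWitness_get_wanted_height.2) ∧ Pre_get_wanted_height (pvDiffWitness_get_wanted_height.1) (pvDiffWitness_get_wanted_height.2) ∧ D_get_wanted_height (pvDiffWitness_get_wanted_height.1) (pvDiffWitness_get_wanted_height.2) ∧ get_wanted_height (pvDiffWitness_get_wanted_height.1) (pvDiffWitness_get_wanted_height.2) = pvDiffWitnessOut_get_wanted_height.1 ∧ get_wanted_height_alt (pvDiffWitness_get_wanted_height.1) (pvDiffWitness_get_wanted_height.2) = pvDiffWitnessOut_get_wanted_height.2 ∧ pvDiffWitnessOut_get_wanted_height.1 ≠ pvDiffWitnessOut_get_wanted_height.2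
def Claim_exact_get_wanted_height : Prop := ∀ (need_below : Bool) (position : List Int), Dom_get_wanted_height need_below position → Pre_get_wanted_height need_below position → D_get_wanted_height need_below position → get_wanted_height need_below position ≠ get_wanted_height_alt need_below position

-- ===== LEMMAS AND PROOFS =====

-- pvBad x y holds iff some platform matches A's above-branch test for (x, y) but every matching
-- platform has height h with h - y ≥ 99999, so A's sentinel cap rejects all of them.
def pvBad (x y : Int) : Prop :=
  (545 ≤ x ∧ x ≤ 735 ∧ y ≤ -99939) ∨
  (¬(545 ≤ x ∧ x ≤ 735) ∧ (165 ≤ x ∧ x ≤ 355 ∨ 820 ≤ x ∧ x ≤ 1010) ∧ y ≤ -99859) ∨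
  (¬(545 ≤ x ∧ x ≤ 735) ∧ ¬(165 ≤ x ∧ x ≤ 355 ∨ 820 ≤ x ∧ x ≤ 1010) ∧ 54 ≤ x ∧ x ≤ 1090 ∧ y ≤ -99699)

theorem pvBad_iff_D (a b : Int) (rest : List Int) :
    pvBad a b ↔ D_get_wanted_height false (a :: b :: rest) := by
  unfold pvBad D_get_wanted_height
  simp only [List.getD_cons_zero, List.getD_cons_succ, List.length_cons, true_and]
  constructor
  · intro h; refine ⟨by omega, by omega, by omega, by omega, by omega, by omega⟩
  · intro h; omega

set_option maxHeartbeats 1000000 in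
theorem pv_core_below (x y : Int) : pvLoopA true x y = pvCoreB true x y := by
  simp only [pvLoopA, pvCoreB, pvPlatformsA, List.foldl_cons, List.foldl_nil,
    Bool.true_eq_false, false_and, if_false, true_and, if_true]
  split_ifs <;> first | rfl | omega

set_option maxHeartbeats 4000000 in
theorem pv_core_above (x y : Int) (h : ¬ pvBad x y) :
    pvLoopA false x y = pvCoreB false x y := by
  unfold pvBad at h
  simp only [pvLoopA, pvCoreB, pvPlatformsA, List.foldl_cons, List.foldl_nil,
    Bool.false_eq_true, false_and, if_false, true_and]
  split_ifs <;> first | rfl | omega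

set_option maxHeartbeats 4000000 in
theorem pv_core_diff (x y : Int) (h : pvBad x y) :
    pvLoopA false x y = 920 ∧
      (pvCoreB false x y = 60 ∨ pvCoreB false x y = 140 ∨ pvCoreB false x y = 300) := by
  unfold pvBad at h
  simp only [pvLoopA, pvCoreB, pvPlatformsA, List.foldl_cons, List.foldl_nil,
    Bool.false_eq_true, false_and, if_false, true_and]
  split_ifs <;> first | (exfalso; omega) | (constructor <;> first | rfl | omega)

theorem pv_get1 (a b : Int) (rest : List Int) : PySem.List.pyGet? (a :: b :: rest) 1 = some b := by
  simp [PySem.List.pyGet?, PySem.List.pyIdx?]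

-- ===== VERDICT (by name: the statement is the Claim_ definition above) =====
theorem get_wanted_height_spec : Claim_unchanged_get_wanted_height := by
  intro nb pos _ hpre hnd
  match pos, hpre with
  | a :: b :: rest, _ =>
    unfold get_wanted_height get_wanted_height_alt
    rw [PySem.List.pyGet?_zero_cons, pv_get1]
    cases nb with
    | true => exact pv_core_below a b
    | false =>
      apply pv_core_above
      intro hbad
      exact hnd ((pvBad_iff_D a b rest).mp hbad)

theorem get_wanted_height_changed : Claim_changed_get_wanted_height := by
  unfold Claim_changed_get_wanted_height; decide

theorem get_wanted_height_tight : Claim_exact_get_wanted_height := by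
  intro nb pos _ hpre hd
  have hnb : nb = false := hd.1
  subst hnb
  match pos, hpre with
  | a :: b :: rest, _ =>
    unfold get_wanted_height get_wanted_height_alt
    rw [PySem.List.pyGet?_zero_cons, pv_get1]
    have hbad' : pvBad a b := (pvBad_iff_D a b rest).mpr hd
    obtain ⟨hA, hB⟩ := pv_core_diff a b hbad'
    show pvLoopA false a b ≠ pvCoreB false a b
    rw [hA]
    rcases hB with h | h | h <;> rw [h] <;> decide
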